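-- pv_equiv track=rewrite | github.com/arfiligol/superconducting-circuits-tutorial | src/core/simulation/application/trace_architecture.py | _sanitize_postprocess_label_token
-- ===== SOURCE A (Python) =====
-- def _sanitize_postprocess_label_token(label: str) -> str:
--     """Sanitize transformed port labels into stable parameter tokens."""
--     sanitized = (
--         str(label)
--         .replace("(", "_")
--         .replace(")", "")
--         .replace(",", "_")
--         .replace(" ", "")
--         .replace("-", "_")
--         .replace("/", "_")
--     )
--     while "__" in sanitized:
--         sanitized = sanitized.replace("__", "_")
--     return sanitized.strip("_") or "x"
-- ===== SOURCE B (Python) =====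
-- def _sanitize_postprocess_label_token(label: str) -> str:
--     """Sanitize transformed port labels into stable parameter tokens (single pass)."""
--     out = []
--     for ch in str(label):
--         if ch in "(,-/":
--             ch = "_"
--         elif ch in ") ":
--             continue
--         if ch != "_" or not out or out[-1] != "_":
--             out.append(ch)
--     return "".join(out).strip("_") or "x"
-- ===== Notes on version B (the rewrite author's own statement) =====
-- stated objective: alternative
-- what changed: Replaced A's six sequential full-string replace passes plus the repeated pairwise-collapse while-loop by one character-by-character pass that maps the separator characters to underscore, drops the deleted characters, and suppresses consecutive underscores while building the output.
import Mathlib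
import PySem

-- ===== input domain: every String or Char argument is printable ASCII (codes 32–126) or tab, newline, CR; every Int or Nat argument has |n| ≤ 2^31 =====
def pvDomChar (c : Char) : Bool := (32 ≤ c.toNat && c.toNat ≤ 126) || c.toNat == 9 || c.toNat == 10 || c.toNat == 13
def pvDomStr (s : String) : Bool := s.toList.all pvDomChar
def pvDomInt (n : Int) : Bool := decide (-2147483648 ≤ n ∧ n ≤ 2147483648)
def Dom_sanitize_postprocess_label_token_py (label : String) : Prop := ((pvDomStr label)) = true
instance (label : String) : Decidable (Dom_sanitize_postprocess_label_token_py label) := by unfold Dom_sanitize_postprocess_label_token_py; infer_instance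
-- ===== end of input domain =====

-- B replaces A's six sequential replace passes plus the repeated pairwise-collapse while-loop by
-- one character pass that maps/drops/collapses as it goes (objective: alternative single-pass algorithm).

-- ===== PORT A =====
-- helper needed by the port's termination proof: s.replace("__","_") characterised as a
-- structural recursion, so that the while-loop measure (string length) strictly decreases.
def pvRep2 : List Char → List Char
  | [] => []
  | [c] => [c]
  | a :: b :: t => if a = '_' ∧ b = '_' then '_' :: pvRep2 t else a :: pvRep2 (b :: t)

lemma pvGo2_eq (fuel : Nat) : ∀ (l acc : List Char), l.length ≤ fuel →
    PySem.Chars.replace.go ['_', '_'] ['_'] fuel l acc = acc.reverse ++ pvRep2 l := by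
  induction fuel with
  | zero =>
    intro l acc h
    have : l = [] := List.eq_nil_of_length_eq_zero (Nat.le_zero.mp h)
    subst this
    rw [PySem.Chars.replace.go.eq_def]
    simp [pvRep2]
  | succ n ih =>
    intro l acc h
    match l with
    | [] => rw [PySem.Chars.replace.go.eq_def]; simp [pvRep2]
    | [c] =>
      rw [PySem.Chars.replace.go.eq_def]
      have hpre : List.isPrefixOf ['_', '_'] [c] = false := by
        simp [List.isPrefixOf]
      simp only [hpre]
      rw [ih [] (c :: acc) (by simp)]
      simp [pvRep2]
    | a :: b :: t =>
      rw [PySem.Chars.replace.go.eq_def]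
      by_cases hab : a = '_' ∧ b = '_'
      · obtain ⟨ha, hb⟩ := hab; subst ha; subst hb
        have hpre : List.isPrefixOf ['_', '_'] ('_' :: '_' :: t) = true := by
          simp [List.isPrefixOf]
        simp only [hpre, if_true]
        rw [show List.drop (['_', '_'] : List Char).length ('_' :: '_' :: t) = t from rfl]
        rw [ih t (['_'].reverse ++ acc) (by simp at h ⊢; omega)]
        simp [pvRep2]
      · have hpre : List.isPrefixOf ['_', '_'] (a :: b :: t) = false := by
          have hne : ¬('_' = a ∧ '_' = b) := fun ⟨h1, h2⟩ => hab ⟨h1.symm, h2.symm⟩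
          simp [List.isPrefixOf]
          tauto
        simp only [hpre]
        rw [ih (b :: t) (a :: acc) (by simp at h ⊢; omega)]
        simp [pvRep2, hab]

lemma pvReplace_pair (l : List Char) :
    PySem.Chars.replace l ['_', '_'] ['_'] = pvRep2 l := by
  rw [PySem.Chars.replace]
  simp [pvGo2_eq l.length l [] (le_refl _)]

lemma pvRep2_length_le (l : List Char) : (pvRep2 l).length ≤ l.length := by
  fun_induction pvRep2 l <;> simp_all <;> omega

lemma pvRep2_length_lt (l : List Char) (h : ['_', '_'] <:+: l) :
    (pvRep2 l).length < l.length := by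
  fun_induction pvRep2 l with
  | case1 => simp at h
  | case2 c =>
    exfalso
    rcases h with ⟨p, s, hps⟩
    have := congrArg List.length hps; simp at this; omega
  | case3 a b t hab ih =>
    have := pvRep2_length_le t
    simp; omega
  | case4 a b t hab ih =>
    rcases List.infix_cons_iff.mp h with hp | hi
    · exfalso
      rcases hp with ⟨s, hs⟩
      simp at hs
      exact hab ⟨hs.1.symm, hs.2.1.symm⟩
    · have := ih hi
      simp at this ⊢; omega

-- the `while "__" in sanitized:` loop of A
def pvCollapseLoop (s : String) : String :=
  if PySem.Str.isIn "__" s then pvCollapseLoop (PySem.Str.replace s "__" "_") else s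
termination_by s.toList.length
decreasing_by
  rename_i h
  have h' : ('_' :: ['_']) <:+: s.toList := by
    have := (PySem.Str.isIn_iff_infix "__" s).mp h
    simpa using this
  simp [PySem.Str.toList_replace]
  show (PySem.Chars.replace s.toList ['_', '_'] ['_']).length < s.toList.length
  rw [pvReplace_pair]
  exact pvRep2_length_lt _ h'

def sanitize_postprocess_label_token_py (label : String) : String :=
  let sanitized :=
    PySem.Str.replace
      (PySem.Str.replace
        (PySem.Str.replace
          (PySem.Str.replace
            (PySem.Str.replace
              (PySem.Str.replace label "(" "_")
              ")" "")
            "," "_")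
          " " "")
        "-" "_")
      "/" "_"
  let sanitized := pvCollapseLoop sanitized
  let t := PySem.Str.stripChars sanitized "_"
  if t = "" then "x" else t

-- ===== PORT B =====
-- `if ch != "_" or not out or out[-1] != "_": out.append(ch)` of Source B
def pvAltPush (out : List Char) (ch : Char) : List Char :=
  if ch = '_' && out.getLast? == some '_' then out else out ++ [ch]

-- one iteration of Source B's `for ch in str(label):` body
def pvAltStep (out : List Char) (ch : Char) : List Char :=
  if ch = '(' || ch = ',' || ch = '-' || ch = '/' then pvAltPush out '_'
  else if ch = ')' || ch = ' ' then out
  else pvAltPush out ch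

def sanitize_postprocess_label_token_py_alt (label : String) : String :=
  let out := label.toList.foldl pvAltStep []
  let t := PySem.Str.stripChars (String.ofList out) "_"
  if t = "" then "x" else t

-- ===== PRECONDITION & SPEC =====
def Spec_sanitize_postprocess_label_token_py (label : String) (out : String) : Prop := out = sanitize_postprocess_label_token_py_alt label
instance (label : String) (out : String) : Decidable (Spec_sanitize_postprocess_label_token_py label out) := by unfold Spec_sanitize_postprocess_label_token_py; infer_instance

-- ===== CLAIM (what is proved, stated in full; the proofs are below) =====
def Claim_equal_sanitize_postprocess_label_token_py : Prop := ∀ (label : String), Dom_sanitize_postprocess_label_token_py label → Spec_sanitize_postprocess_label_token_py label (sanitize_postprocess_label_token_py label)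

-- ===== LEMMAS AND PROOFS =====

-- the per-character effect of A's six replace passes
def pvMap1 (c : Char) : List Char :=
  if c = '(' then ['_'] else if c = ')' then [] else if c = ',' then ['_']
  else if c = ' ' then [] else if c = '-' then ['_'] else if c = '/' then ['_'] else [c]

lemma pvGo1_eq (c : Char) (new : List Char) (fuel : Nat) : ∀ (l acc : List Char), l.length ≤ fuel →
    PySem.Chars.replace.go [c] new fuel l acc =
      acc.reverse ++ l.flatMap (fun a => if a = c then new else [a]) := by
  induction fuel with
  | zero =>
    intro l acc h
    have : l = [] := List.eq_nil_of_length_eq_zero (Nat.le_zero.mp h)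
    subst this
    rw [PySem.Chars.replace.go.eq_def]; simp
  | succ n ih =>
    intro l acc h
    match l with
    | [] => rw [PySem.Chars.replace.go.eq_def]; simp
    | a :: t =>
      rw [PySem.Chars.replace.go.eq_def]
      by_cases hac : a = c
      · subst hac
        have hpre : List.isPrefixOf [a] (a :: t) = true := by simp [List.isPrefixOf]
        simp only [hpre, if_true]
        rw [show List.drop ([a] : List Char).length (a :: t) = t from rfl]
        rw [ih t (new.reverse ++ acc) (by simp at h ⊢; omega)]
        simp
      · have hpre : List.isPrefixOf [c] (a :: t) = false := by
          simp [List.isPrefixOf]; exact fun h' => hac h'.symm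
        simp only [hpre]
        rw [ih t (a :: acc) (by simp at h ⊢; omega)]
        simp [hac]

lemma pvReplace_single (l : List Char) (c : Char) (new : List Char) :
    PySem.Chars.replace l [c] new = l.flatMap (fun a => if a = c then new else [a]) := by
  rw [PySem.Chars.replace]
  simp [pvGo1_eq c new l.length l [] (le_refl _)]

-- the six chained replaces are one flatMap of pvMap1
lemma pvSixfold (l : List Char) :
    PySem.Chars.replace
      (PySem.Chars.replace
        (PySem.Chars.replace
          (PySem.Chars.replace
            (PySem.Chars.replace
              (PySem.Chars.replace l ['('] ['_'])
              [')'] [])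
            [','] ['_'])
          [' '] [])
        ['-'] ['_'])
      ['/'] ['_'] = l.flatMap pvMap1 := by
  simp only [pvReplace_single]
  induction l with
  | nil => simp
  | cons a t ih =>
    simp only [List.flatMap_cons, List.flatMap_append, ih]
    congr 1
    by_cases h1 : a = '(' <;> by_cases h2 : a = ')' <;> by_cases h3 : a = ','
      <;> by_cases h4 : a = ' ' <;> by_cases h5 : a = '-' <;> by_cases h6 : a = '/'
      <;> simp_all [pvMap1]

-- the run-collapsed form both pipelines reach
def pvSq : List Char → List Char
  | [] => []
  | c :: t =>
    if c = '_' then '_' :: pvSq (t.dropWhile (· == '_')) else c :: pvSq t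
termination_by l => l.length
decreasing_by
  · have := List.length_dropWhile_le (· == '_') t; simp; omega
  · simp

lemma pvSq_of_no_pair (l : List Char) (h : ¬ ('_' :: ['_']) <:+: l) : pvSq l = l := by
  fun_induction pvSq l with
  | case1 => rfl
  | case2 t ih =>
    have hhd : t.dropWhile (· == '_') = t := by
      cases t with
      | nil => rfl
      | cons b u =>
        have hb : (b == '_') = false := by
          have hb' : b ≠ '_' := fun hb => h ⟨[], u, by subst hb; simp⟩
          simp [hb']
        simp [List.dropWhile, hb]
    rw [hhd] at ih ⊢
    rw [ih (fun h' => h (List.infix_cons_iff.mpr (Or.inr h')))]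
  | case3 c t hc ih =>
    rw [ih (fun h' => h (List.infix_cons_iff.mpr (Or.inr h')))]

-- joint invariance of pvSq (and of pvSq after a dropWhile) under one replace("__","_") pass
lemma pvSq_rep2 (n : Nat) : ∀ l : List Char, l.length ≤ n →
    pvSq (pvRep2 l) = pvSq l ∧
    pvSq ((pvRep2 l).dropWhile (· == '_')) = pvSq (l.dropWhile (· == '_')) := by
  induction n with
  | zero =>
    intro l h
    have : l = [] := List.eq_nil_of_length_eq_zero (Nat.le_zero.mp h)
    subst this; simp [pvRep2]
  | succ n ih =>
    intro l h
    match l with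
    | [] => simp [pvRep2]
    | [c] => simp [pvRep2]
    | a :: b :: t =>
      simp only [List.length_cons] at h
      by_cases hab : a = '_' ∧ b = '_'
      · obtain ⟨ha, hb⟩ := hab; subst ha; subst hb
        rw [pvRep2, if_pos ⟨rfl, rfl⟩]
        have iht := ih t (by omega)
        constructor
        · show pvSq ('_' :: pvRep2 t) = pvSq ('_' :: '_' :: t)
          rw [pvSq, if_pos rfl, pvSq, if_pos rfl]
          simp only [List.dropWhile]
          simp only [show ('_' == '_') = true from rfl]
          rw [iht.2]
        · show pvSq (('_' :: pvRep2 t).dropWhile (· == '_')) =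
              pvSq (('_' :: '_' :: t).dropWhile (· == '_'))
          simp only [List.dropWhile, show ('_' == '_') = true from rfl]
          exact iht.2
      · rw [pvRep2, if_neg hab]
        have hbt := ih (b :: t) (by simp; omega)
        by_cases ha : a = '_'
        · subst ha
          have hb : b ≠ '_' := fun hb => hab ⟨rfl, hb⟩
          have hbt' : pvSq (pvRep2 (b :: t)) = pvSq (b :: t) := hbt.1
          constructor
          · rw [pvSq, if_pos rfl, pvSq, if_pos rfl]
            congr 1
            have hrep : pvRep2 (b :: t) = b :: pvRep2 t ∨
                (∃ u, b :: t = b :: '_' :: u ∧ False) := by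
              left
              match t with
              | [] => rfl
              | c' :: u =>
                rw [pvRep2]
                rw [if_neg (fun hc => hb hc.1)]
            rcases hrep with hrep | ⟨_, _, hF⟩
            · rw [hrep]
              simp only [List.dropWhile, show (b == '_') = false from by simp [hb]]
              have := (ih (b :: t) (by simp; omega)).1
              rw [hrep] at this
              exact this
            · exact absurd hF not_false
          · simp only [List.dropWhile, show ('_' == '_') = true from rfl]
            exact hbt.2
        · constructor
          · rw [pvSq, if_neg ha, pvSq, if_neg ha]
            rw [hbt.1]
          · simp only [List.dropWhile, show (a == '_') = false from by simp [ha]]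
            rw [pvSq, if_neg ha, pvSq, if_neg ha, hbt.1]

-- A's while loop computes pvSq
lemma pvCollapseLoop_toList (n : Nat) : ∀ s : String, s.toList.length ≤ n →
    (pvCollapseLoop s).toList = pvSq s.toList := by
  induction n with
  | zero =>
    intro s h
    have hnil : s.toList = [] := List.eq_nil_of_length_eq_zero (Nat.le_zero.mp h)
    have hfalse : PySem.Chars.isIn ['_', '_'] s.toList = false := by
      apply (PySem.Chars.isIn_eq_false_iff _ _).mpr
      rw [hnil]; intro h'
      have := h'.length_le; simp at this
    rw [pvCollapseLoop, if_neg (by simp; exact hfalse)]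
    rw [pvSq_of_no_pair]
    rw [hnil]
    intro h'
    have := h'.length_le; simp at this
  | succ n ih =>
    intro s h
    rw [pvCollapseLoop]
    by_cases hin : PySem.Str.isIn "__" s
    · rw [if_pos hin]
      have hinf : ('_' :: ['_']) <:+: s.toList := by
        have := (PySem.Str.isIn_iff_infix "__" s).mp hin
        simpa using this
      have hlen : (PySem.Str.replace s "__" "_").toList.length ≤ n := by
        rw [PySem.Str.toList_replace]
        show (PySem.Chars.replace s.toList ['_','_'] ['_']).length ≤ n
        rw [pvReplace_pair]
        have := pvRep2_length_lt s.toList hinf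
        omega
      rw [ih _ hlen]
      rw [PySem.Str.toList_replace]
      show pvSq (PySem.Chars.replace s.toList ['_','_'] ['_']) = pvSq s.toList
      rw [pvReplace_pair]
      exact (pvSq_rep2 s.toList.length s.toList (le_refl _)).1
    · rw [if_neg hin]
      rw [pvSq_of_no_pair]
      intro h'
      rw [PySem.Str.isIn] at hin
      exact hin (by
        apply (PySem.Chars.isIn_iff_infix _ _).mpr
        simpa using h')

lemma pvCollapseLoop_toList' (s : String) : (pvCollapseLoop s).toList = pvSq s.toList :=
  pvCollapseLoop_toList s.toList.length s (le_refl _)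

-- B's fold computes pvSq of the mapped characters (joint invariant on the accumulator's last char)
lemma pvFold_eq (l : List Char) : ∀ out : List Char,
    (out.getLast? ≠ some '_' → l.foldl pvAltStep out = out ++ pvSq (l.flatMap pvMap1)) ∧
    (out.getLast? = some '_' →
      l.foldl pvAltStep out = out ++ pvSq ((l.flatMap pvMap1).dropWhile (· == '_'))) := by
  induction l with
  | nil => intro out; simp [pvSq]
  | cons c t ih =>
    intro out
    by_cases hc : c = '(' ∨ c = ',' ∨ c = '-' ∨ c = '/'
    · have hstep : pvAltStep out c = pvAltPush out '_' := by
        rcases hc with h | h | h | h <;> subst h <;> rfl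
      have hmap : pvMap1 c = ['_'] := by
        rcases hc with h | h | h | h <;> subst h <;> rfl
      constructor
      · intro hlast
        have hpush : pvAltPush out '_' = out ++ ['_'] := by
          simp [pvAltPush]
          intro h'; exact absurd h' hlast
        rw [List.foldl_cons, hstep, hpush]
        rw [(ih (out ++ ['_'])).2 (by simp)]
        simp only [List.flatMap_cons, hmap, List.append_assoc]
        congr 1
        show '_' :: pvSq _ = pvSq ('_' :: t.flatMap pvMap1)
        rw [pvSq, if_pos rfl]
      · intro hlast
        have hpush : pvAltPush out '_' = out := by simp [pvAltPush, hlast]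
        rw [List.foldl_cons, hstep, hpush]
        rw [(ih out).2 hlast]
        simp [hmap, List.dropWhile]
    · by_cases hd : c = ')' ∨ c = ' '
      · have hstep : pvAltStep out c = out := by
          rcases hd with h | h <;> subst h <;> rfl
        have hmap : pvMap1 c = [] := by
          rcases hd with h | h <;> subst h <;> rfl
        rw [List.foldl_cons, hstep]
        simp only [List.flatMap_cons, hmap, List.nil_append]
        exact ih out
      · have h1 : c ≠ '(' := fun h => hc (Or.inl h)
        have h2 : c ≠ ',' := fun h => hc (Or.inr (Or.inl h))
        have h3 : c ≠ '-' := fun h => hc (Or.inr (Or.inr (Or.inl h)))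
        have h4 : c ≠ '/' := fun h => hc (Or.inr (Or.inr (Or.inr h)))
        have h5 : c ≠ ')' := fun h => hd (Or.inl h)
        have h6 : c ≠ ' ' := fun h => hd (Or.inr h)
        have hstep : pvAltStep out c = pvAltPush out c := by
          simp [pvAltStep, h1, h2, h3, h4, h5, h6]
        have hmap : pvMap1 c = [c] := by
          simp [pvMap1, h1, h2, h3, h4, h5, h6]
        by_cases hu : c = '_'
        · subst hu
          constructor
          · intro hlast
            have hpush : pvAltPush out '_' = out ++ ['_'] := by
              simp [pvAltPush]; intro h'; exact absurd h' hlast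
            rw [List.foldl_cons, hstep, hpush]
            rw [(ih (out ++ ['_'])).2 (by simp)]
            simp only [List.flatMap_cons, hmap, List.append_assoc]
            congr 1
            show '_' :: pvSq _ = pvSq ('_' :: t.flatMap pvMap1)
            rw [pvSq, if_pos rfl]
          · intro hlast
            have hpush : pvAltPush out '_' = out := by simp [pvAltPush, hlast]
            rw [List.foldl_cons, hstep, hpush]
            rw [(ih out).2 hlast]
            simp [hmap, List.dropWhile]
        · have hpush : pvAltPush out c = out ++ [c] := by
            simp [pvAltPush, hu]
          constructor
          · intro _
            rw [List.foldl_cons, hstep, hpush]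
            rw [(ih (out ++ [c])).1 (by simp [hu])]
            simp only [List.flatMap_cons, hmap, List.append_assoc]
            congr 1
            show c :: pvSq _ = pvSq (c :: t.flatMap pvMap1)
            rw [pvSq, if_neg hu]
          · intro _
            rw [List.foldl_cons, hstep, hpush]
            rw [(ih (out ++ [c])).1 (by simp [hu])]
            simp only [List.flatMap_cons, hmap, List.append_assoc]
            congr 1
            show c :: pvSq _ = pvSq ((c :: t.flatMap pvMap1).dropWhile (· == '_'))
            simp only [List.dropWhile, show (c == '_') = false from by simp [hu]]
            rw [pvSq, if_neg hu]

-- strings with the same characters are equal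
lemma pvString_ext {s t : String} (h : s.toList = t.toList) : s = t := by
  have := congrArg String.ofList h
  simpa using this

-- ===== VERDICT (by name: the statement is the Claim_ definition above) =====
theorem sanitize_postprocess_label_token_py_spec : Claim_equal_sanitize_postprocess_label_token_py := by
  intro label _
  show sanitize_postprocess_label_token_py label = sanitize_postprocess_label_token_py_alt label
  unfold sanitize_postprocess_label_token_py sanitize_postprocess_label_token_py_alt
  have hfold : label.toList.foldl pvAltStep [] = pvSq (label.toList.flatMap pvMap1) :=
    (pvFold_eq label.toList []).1 (by simp)
  have hA : (pvCollapseLoop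
      (PySem.Str.replace
        (PySem.Str.replace
          (PySem.Str.replace
            (PySem.Str.replace
              (PySem.Str.replace
                (PySem.Str.replace label "(" "_")
                ")" "")
              "," "_")
            " " "")
          "-" "_")
        "/" "_")).toList = pvSq (label.toList.flatMap pvMap1) := by
    refine Eq.trans (pvCollapseLoop_toList' _) ?_
    refine congrArg pvSq ?_
    simp only [PySem.Str.toList_replace]
    show PySem.Chars.replace
      (PySem.Chars.replace
        (PySem.Chars.replace
          (PySem.Chars.replace
            (PySem.Chars.replace
              (PySem.Chars.replace label.toList ['('] ['_'])
              [')'] [])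
            [','] ['_'])
          [' '] [])
        ['-'] ['_'])
      ['/'] ['_'] = label.toList.flatMap pvMap1
    exact pvSixfold label.toList
  have hstrip :
      PySem.Str.stripChars
        (pvCollapseLoop
          (PySem.Str.replace
            (PySem.Str.replace
              (PySem.Str.replace
                (PySem.Str.replace
                  (PySem.Str.replace
                    (PySem.Str.replace label "(" "_")
                    ")" "")
                  "," "_")
                " " "")
              "-" "_")
            "/" "_")) "_" =
      PySem.Str.stripChars (String.ofList (label.toList.foldl pvAltStep [])) "_" := by
    apply pvString_ext
    simp only [PySem.Str.toList_stripChars]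
    rw [hA, hfold]
    simp
  exact congrArg (fun t => if t = "" then "x" else t) hstrip
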